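-- pv_equiv track=rewrite | github.com/SunivAlgo/Algorithm | byeonghun/13week/순위/순위.py | solution
-- ===== SOURCE A (Python) =====
-- def solution(n, results):
--     answer = 0
--     d = {}
--     rank = {}
--     for r in results:
--         if r[0] not in d:
--             d[r[0]] = [[r[1]],[]]
--         else:
--             d[r[0]][0].append(r[1])
--         if r[1] not in d:
--             d[r[1]] = [[],[r[0]]]
--         else:
--             d[r[1]][1].append(r[0])
--     return d
-- ===== SOURCE B (Python) =====
-- def solution(n, results):
--     # For each node (in first-appearance order, winner before loser), compute its
--     # win/loss lists by scanning the match list directly: no incremental dict mutation.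
--     nodes = dict.fromkeys(x for pair in results for x in pair)
--     return {k: [[l for w, l in results if w == k],
--                 [w for w, l in results if l == k]] for k in nodes}
-- ===== Notes on version B (the rewrite author's own statement) =====
-- stated objective: simpler
-- what changed: Replaces A's single incremental pass that mutates nested lists inside a dict behind four membership-guarded branches by a declarative per-node computation: collect the ordered node set once, then for each node derive its win and loss lists by filtering the match list directly.
import Mathlib
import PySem

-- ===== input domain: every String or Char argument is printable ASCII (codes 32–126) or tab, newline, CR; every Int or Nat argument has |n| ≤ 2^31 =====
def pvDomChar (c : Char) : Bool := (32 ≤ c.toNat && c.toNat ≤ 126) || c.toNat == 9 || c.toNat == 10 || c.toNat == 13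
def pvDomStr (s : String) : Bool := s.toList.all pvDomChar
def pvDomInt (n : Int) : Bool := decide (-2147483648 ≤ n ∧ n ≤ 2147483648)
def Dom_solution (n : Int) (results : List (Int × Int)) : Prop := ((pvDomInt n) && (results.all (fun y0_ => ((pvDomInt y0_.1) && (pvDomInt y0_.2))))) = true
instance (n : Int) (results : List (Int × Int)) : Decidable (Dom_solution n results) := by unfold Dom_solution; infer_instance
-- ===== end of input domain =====

-- B replaces A's incremental membership-guarded dict mutation by a declarative per-node
-- filtering of the match list over the ordered node set (objective: simpler, not faster).

-- ===== PORT A =====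
-- One loop iteration of A's `for r in results` body.  Python's `d[r[0]][0].append(r[1])`
-- reads the stored 2-element list and replaces its component 0; every value this code ever
-- stores is a 2-element list, so `List.getD`/`List.set` at the literal indices 0/1 are exact.
def pvStep (d : PySem.Dict Int (List (List Int))) (r : Int × Int) : PySem.Dict Int (List (List Int)) :=
  let d1 :=
    if d.contains r.1 then
      d.insert r.1 ((d.getD r.1 []).set 0 ((d.getD r.1 []).getD 0 [] ++ [r.2]))
    else
      d.insert r.1 [[r.2], []]
  if d1.contains r.2 then
    d1.insert r.2 ((d1.getD r.2 []).set 1 ((d1.getD r.2 []).getD 1 [] ++ [r.1]))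
  else
    d1.insert r.2 [[], [r.1]]

def solution (n : Int) (results : List (Int × Int)) : List (Int × List (List Int)) :=
  (results.foldl pvStep PySem.Dict.empty).items

-- ===== PORT B =====
-- `dict.fromkeys(flattened)` = ordered dedup (PySem.List.dedup); the dict comprehension runs
-- over these distinct keys in order, so its items are exactly this map; the two inner
-- comprehensions are filter-then-project over `results`.
def solution_alt (n : Int) (results : List (Int × Int)) : List (Int × List (List Int)) :=
  let nodes := PySem.List.dedup (results.flatMap (fun p => [p.1, p.2]))
  nodes.map (fun k =>
    (k, [((results.filter (fun p => p.1 == k)).map (fun p => p.2)),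
         ((results.filter (fun p => p.2 == k)).map (fun p => p.1))]))

-- ===== PRECONDITION & SPEC =====
def Spec_solution (n : Int) (results : List (Int × Int)) (out : List (Int × List (List Int))) : Prop := out = solution_alt n results
instance (n : Int) (results : List (Int × Int)) (out : List (Int × List (List Int))) : Decidable (Spec_solution n results out) := by unfold Spec_solution; infer_instance

-- ===== CLAIM (what is proved, stated in full; the proofs are below) =====
def Claim_equal_solution : Prop := ∀ (n : Int) (results : List (Int × Int)), Dom_solution n results → Spec_solution n results (solution n results)

-- ===== LEMMAS AND PROOFS =====

-- All nodes of `results`, winner before loser, in order of appearance.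
def pvFlat (rs : List (Int × Int)) : List Int := rs.flatMap (fun p => [p.1, p.2])
-- The losers beaten by k, in order; the winners over k, in order.
def pvW (rs : List (Int × Int)) (k : Int) : List Int := (rs.filter (fun p => p.1 == k)).map (fun p => p.2)
def pvL (rs : List (Int × Int)) (k : Int) : List Int := (rs.filter (fun p => p.2 == k)).map (fun p => p.1)

lemma pvFlat_append (rs : List (Int × Int)) (r : Int × Int) :
    pvFlat (rs ++ [r]) = pvFlat rs ++ [r.1, r.2] := by
  simp [pvFlat]

lemma pvW_append (rs : List (Int × Int)) (r : Int × Int) (k : Int) :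
    pvW (rs ++ [r]) k = pvW rs k ++ (if k = r.1 then [r.2] else []) := by
  by_cases h : k = r.1
  · subst h; simp [pvW, List.filter_append]
  · have h2 : ¬ r.1 = k := fun hh => h hh.symm
    simp [pvW, List.filter_append, h, h2]

lemma pvL_append (rs : List (Int × Int)) (r : Int × Int) (k : Int) :
    pvL (rs ++ [r]) k = pvL rs k ++ (if k = r.2 then [r.1] else []) := by
  by_cases h : k = r.2
  · subst h; simp [pvL, List.filter_append]
  · have h2 : ¬ r.2 = k := fun hh => h hh.symm
    simp [pvL, List.filter_append, h, h2]

lemma pvW_nil_of_not_mem (rs : List (Int × Int)) (k : Int) (h : k ∉ pvFlat rs) : pvW rs k = [] := by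
  simp only [pvW, List.map_eq_nil_iff, List.filter_eq_nil_iff]
  intro p hp hpk
  apply h
  simp only [pvFlat, List.mem_flatMap]
  refine ⟨p, hp, ?_⟩
  simp only [beq_iff_eq] at hpk
  simp [hpk]

lemma pvL_nil_of_not_mem (rs : List (Int × Int)) (k : Int) (h : k ∉ pvFlat rs) : pvL rs k = [] := by
  simp only [pvL, List.map_eq_nil_iff, List.filter_eq_nil_iff]
  intro p hp hpk
  apply h
  simp only [pvFlat, List.mem_flatMap]
  refine ⟨p, hp, ?_⟩
  simp only [beq_iff_eq] at hpk
  simp [hpk]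

lemma pvOfList_append_two (xs : List Int) (a b : Int) :
    PySem.Set.ofList (xs ++ [a, b]) = PySem.Set.add (PySem.Set.add (PySem.Set.ofList xs) a) b := by
  have h : xs ++ [a, b] = (xs ++ [a]) ++ [b] := by simp
  rw [h, PySem.Set.ofList_append_singleton, PySem.Set.ofList_append_singleton]

-- The content of A's dict after processing rs: key k is present iff k occurs in rs,
-- and then holds its win list and loss list.
lemma pvGet_foldA (rs : List (Int × Int)) :
    ∀ k : Int, ((rs.foldl pvStep PySem.Dict.empty).get? k) =
      if k ∈ pvFlat rs then some [pvW rs k, pvL rs k] else none := by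
  induction rs using List.reverseRecOn with
  | nil => intro k; simp [pvFlat, PySem.Dict.get?_empty]
  | append_singleton rs r ih =>
    intro k
    rw [List.foldl_append, List.foldl_cons, List.foldl_nil]
    by_cases h1 : r.1 ∈ pvFlat rs <;> by_cases h2 : r.2 ∈ pvFlat rs <;>
      by_cases hk1 : k = r.1 <;> by_cases hk2 : k = r.2 <;> by_cases h12 : r.2 = r.1 <;>
      simp_all [pvStep, PySem.Dict.contains_eq_isSome_get?, PySem.Dict.getD_eq_get?_getD,
        PySem.Dict.get?_insert, pvFlat_append, pvW_append, pvL_append,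
        pvW_nil_of_not_mem, pvL_nil_of_not_mem]

-- The key order of A's dict after processing rs: first appearance, winner first.
lemma pvKeys_foldA (rs : List (Int × Int)) :
    ((rs.foldl pvStep PySem.Dict.empty).keys) = PySem.List.dedup (pvFlat rs) := by
  induction rs using List.reverseRecOn with
  | nil => simp [pvFlat, PySem.Dict.keys_empty]
  | append_singleton rs r ih =>
    rw [List.foldl_append, List.foldl_cons, List.foldl_nil]
    rw [pvFlat_append]
    by_cases h1 : r.1 ∈ pvFlat rs <;> by_cases h2 : r.2 ∈ pvFlat rs <;> by_cases h12 : r.2 = r.1 <;>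
      simp_all [pvStep, PySem.Dict.contains_eq_isSome_get?, PySem.Dict.get?_insert,
        pvGet_foldA, PySem.Dict.keys_insert_of_contains, PySem.Dict.keys_insert_of_not_contains,
        PySem.List.dedup_eq_ofList, pvOfList_append_two, PySem.Set.mem_ofList]

-- Items of a dict with distinct keys, reconstructed key by key.
lemma pvItems_eq_keys_map (d : PySem.Dict Int (List (List Int))) (h : d.keys.Nodup) :
    d.items = d.keys.map (fun k => (k, d.getD k [])) := by
  simp only [PySem.Dict.keys, List.map_map]
  conv_lhs => rw [← List.map_id d.items]
  apply List.map_congr_left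
  intro p hp
  have : d.getD p.1 [] = p.2 := PySem.Dict.getD_of_mem_items d (by simpa using hp) h []
  simp [Function.comp, this]

lemma pvSolutionA_eq (n : Int) (rs : List (Int × Int)) :
    solution n rs = (PySem.List.dedup (pvFlat rs)).map (fun k => (k, [pvW rs k, pvL rs k])) := by
  unfold solution
  rw [pvItems_eq_keys_map _ (by rw [pvKeys_foldA]; exact PySem.List.nodup_dedup _), pvKeys_foldA]
  apply List.map_congr_left
  intro k hk
  have hkmem : k ∈ pvFlat rs := by
    have := PySem.List.mem_dedup (xs := pvFlat rs) (x := k)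
    exact this.mp hk
  rw [PySem.Dict.getD_eq_get?_getD, pvGet_foldA]
  simp [hkmem]

-- ===== VERDICT (by name: the statement is the Claim_ definition above) =====
theorem solution_spec : Claim_equal_solution := by
  intro n results _
  unfold Spec_solution
  rw [pvSolutionA_eq]
  rfl
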